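-- pv_equiv track=rewrite | github.com/THUzxj/fKPISelect | anomaly_detection/metric.py | group_pred
-- ===== SOURCE A (Python) =====
-- def group_pred(pred, group_size):
--     anomaly_state = False
--     groups = []
--     group_state = None
--     for i in range(len(pred)):
--         if anomaly_state:
--             if pred[i] == 1:
--                 group_state[1] = i
--             else:
--                 if i - group_state[1] == group_size:
--                     groups.append(group_state)
--                     anomaly_state = False
--         else:
--             if pred[i] == 1:
--                 anomaly_state = True
--                 group_state = [i, i]
--
--     if anomaly_state:
--         groups.append(group_state)
--     return groups
-- ===== SOURCE B (Python) =====
-- def group_pred(pred, group_size):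
--     ones = [i for i, v in enumerate(pred) if v == 1]
--     if not ones:
--         return []
--     groups = []
--     cur = [ones[0], ones[0]]
--     for o in ones[1:]:
--         if o - cur[1] <= group_size:
--             cur[1] = o
--         else:
--             groups.append(cur)
--             cur = [o, o]
--     groups.append(cur)
--     return groups
-- ===== Notes on version B (the rewrite author's own statement) =====
-- stated objective: simpler
-- what changed: B extracts the anomaly positions first and then merges/splits consecutive positions by the gap tolerance, instead of A's stateful scan over every index with a delayed group-closing flag; Pre_ excludes non-positive group_size (outside the natural domain of a gap tolerance), where A's closing test 'i - last == group_size' can never fire so A accidentally lumps all anomalies into one group.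
-- outside the precondition, e.g. on group_pred([1, 0, 1], 0): A returns [[0, 2]], B returns [[0, 0], [2, 2]]; on group_pred([1, 0, 0, 1], -1): A returns [[0, 3]], B returns [[0, 0], [3, 3]]
import Mathlib
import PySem

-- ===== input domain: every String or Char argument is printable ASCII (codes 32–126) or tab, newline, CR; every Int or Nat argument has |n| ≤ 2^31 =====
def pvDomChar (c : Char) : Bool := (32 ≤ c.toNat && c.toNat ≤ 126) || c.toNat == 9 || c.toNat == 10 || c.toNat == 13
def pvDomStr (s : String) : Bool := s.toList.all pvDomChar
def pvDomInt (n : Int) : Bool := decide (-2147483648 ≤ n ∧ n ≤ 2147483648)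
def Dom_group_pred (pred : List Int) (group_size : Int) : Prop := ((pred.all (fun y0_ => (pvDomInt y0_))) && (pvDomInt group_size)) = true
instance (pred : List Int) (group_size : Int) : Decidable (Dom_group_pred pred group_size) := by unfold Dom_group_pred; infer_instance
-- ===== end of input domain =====

-- B groups the precomputed anomaly positions with an explicit gap rule instead of A's
-- index-by-index scan with a delayed-close flag; equal on positive group_size (Pre_); neither mutates its input.

-- ===== PORT A =====
-- loop body of A, acting on (anomaly_state, groups, group_state) and the pair (i, pred[i])
def stepA (group_size : Int) (st : Bool × List (List Int) × List Int) (p : Int × Int) :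
    Bool × List (List Int) × List Int :=
  if st.1 then
    if p.2 = 1 then (true, st.2.1, [PySem.List.pyGetD st.2.2 0 0, p.1])   -- group_state[1] = i
    else if p.1 - PySem.List.pyGetD st.2.2 1 0 = group_size then
      (false, st.2.1 ++ [st.2.2], st.2.2)
    else st
  else
    if p.2 = 1 then (true, st.2.1, [p.1, p.1])
    else st

def group_pred (pred : List Int) (group_size : Int) : List (List Int) :=
  let fin := (PySem.List.pyRange 0 (pred.length : Int) 1).foldl
      (fun st i => stepA group_size st (i, PySem.List.pyGetD pred i 0)) (false, [], [])
  if fin.1 then fin.2.1 ++ [fin.2.2] else fin.2.1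

-- ===== PORT B =====
-- loop body of B, acting on (groups, cur) and the next anomaly position o
def stepB (group_size : Int) (st : List (List Int) × (Int × Int)) (o : Int) :
    List (List Int) × (Int × Int) :=
  if o - st.2.2 ≤ group_size then (st.1, (st.2.1, o))
  else (st.1 ++ [[st.2.1, st.2.2]], (o, o))

def group_pred_alt (pred : List Int) (group_size : Int) : List (List Int) :=
  let ones := (PySem.List.enumerate pred 0).filterMap (fun p => if p.2 = 1 then some p.1 else none)
  match ones with
  | [] => []
  | o0 :: rest =>
    let fin := rest.foldl (stepB group_size) ([], (o0, o0))
    fin.1 ++ [[fin.2.1, fin.2.2]]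

-- ===== PRECONDITION & SPEC =====
-- Pre_ excludes non-positive group_size, outside the natural domain of a gap tolerance: there A's
-- closing test 'i - last == group_size' can never fire, so A accidentally returns one all-spanning group.
def Pre_group_pred (pred : List Int) (group_size : Int) : Prop := 1 ≤ group_size
instance (pred : List Int) (group_size : Int) : Decidable (Pre_group_pred pred group_size) := by unfold Pre_group_pred; infer_instance
def pvWitness_group_pred : List Int × Int := ([1, 1, 0, 1, 0, 0, 1], 1)
def Spec_group_pred (pred : List Int) (group_size : Int) (out : List (List Int)) : Prop := out = group_pred_alt pred group_size
instance (pred : List Int) (group_size : Int) (out : List (List Int)) : Decidable (Spec_group_pred pred group_size out) := by unfold Spec_group_pred; infer_instance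

-- ===== CLAIM (what is proved, stated in full; the proofs are below) =====
def Claim_equal_group_pred : Prop := ∀ (pred : List Int) (group_size : Int), Dom_group_pred pred group_size → Pre_group_pred pred group_size → Spec_group_pred pred group_size (group_pred pred group_size)

-- ===== LEMMAS AND PROOFS =====

-- A's final read-out of its loop state
def outA (fin : Bool × List (List Int) × List Int) : List (List Int) :=
  if fin.1 then fin.2.1 ++ [fin.2.2] else fin.2.1

def onesFn : Int × Int → Option Int := fun p => if p.2 = 1 then some p.1 else none

-- B's read-out given an accumulated state
def outB (gsz : Int) (accB : List (List Int)) (cur : Int × Int) (os : List Int) : List (List Int) :=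
  let fin := os.foldl (stepB gsz) (accB, cur)
  fin.1 ++ [[fin.2.1, fin.2.2]]

lemma outB_cons (gsz : Int) (accB : List (List Int)) (cur : Int × Int) (o : Int) (os : List Int) :
    outB gsz accB cur (o :: os)
    = outB gsz (stepB gsz (accB, cur) o).1 (stepB gsz (accB, cur) o).2 os := rfl

-- main invariant: after the first anomaly, A's state tracks B's state;
-- an = true iff the current group is still open, characterised by the gap from cur.2 to s
lemma main_inv (gsz : Int) (hg : 1 ≤ gsz) :
    ∀ (xs : List Int) (s : Int) (accB : List (List Int)) (cur : Int × Int) (an : Bool),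
    (an = true → cur.2 < s ∧ s - cur.2 ≤ gsz) →
    (an = false → cur.2 + gsz < s) →
    outA ((PySem.List.enumerate xs s).foldl (stepA gsz)
      (an, cond an accB (accB ++ [[cur.1, cur.2]]), [cur.1, cur.2]))
    = outB gsz accB cur ((PySem.List.enumerate xs s).filterMap onesFn) := by
  intro xs
  induction xs with
  | nil =>
    intro s accB cur an _ _
    cases an <;> simp [PySem.List.enumerate, outA, outB]
  | cons x xs ih =>
    intro s accB cur an hT hF
    rw [PySem.List.enumerate_cons, List.foldl_cons, List.filterMap_cons]
    cases an with
    | true =>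
      obtain ⟨h1, h2⟩ := hT rfl
      simp only [Bool.cond_true]
      by_cases hx : x = 1
      · -- anomaly continues: extend the open group
        have hA : stepA gsz (true, accB, [cur.1, cur.2]) (s, x) = (true, accB, [cur.1, s]) := by
          simp [stepA, hx, PySem.List.pyGetD]
        have ho : onesFn (s, x) = some s := by simp [onesFn, hx]
        rw [hA, ho, outB_cons]
        have hB : stepB gsz (accB, cur) s = (accB, (cur.1, s)) := by
          unfold stepB; rw [if_pos h2]
        rw [hB]
        exact ih (s + 1) accB (cur.1, s) true (fun _ => by constructor <;> omega)
          (by simp)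
      · -- non-anomaly index: A closes the group exactly at gap = group_size
        have ho : onesFn (s, x) = none := by simp [onesFn, hx]
        rw [ho]
        by_cases hc : s - cur.2 = gsz
        · have hA : stepA gsz (true, accB, [cur.1, cur.2]) (s, x) =
              (false, accB ++ [[cur.1, cur.2]], [cur.1, cur.2]) := by
            simp [stepA, hx, PySem.List.pyGetD, hc]
          rw [hA]
          have := ih (s + 1) accB cur false (by simp) (fun _ => by omega)
          simpa using this
        · have hA : stepA gsz (true, accB, [cur.1, cur.2]) (s, x) = (true, accB, [cur.1, cur.2]) := by
            simp [stepA, hx, PySem.List.pyGetD, hc]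
          rw [hA]
          have := ih (s + 1) accB cur true (fun _ => by constructor <;> omega) (by simp)
          simpa using this
    | false =>
      have h2 := hF rfl
      simp only [Bool.cond_false]
      by_cases hx : x = 1
      · -- new anomaly: A reopens, B splits here
        have hA : stepA gsz (false, accB ++ [[cur.1, cur.2]], [cur.1, cur.2]) (s, x) =
            (true, accB ++ [[cur.1, cur.2]], [s, s]) := by
          simp [stepA, hx]
        have ho : onesFn (s, x) = some s := by simp [onesFn, hx]
        rw [hA, ho, outB_cons]
        have hB : stepB gsz (accB, cur) s = (accB ++ [[cur.1, cur.2]], (s, s)) := by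
          unfold stepB; rw [if_neg (show ¬(s - cur.2 ≤ gsz) by omega)]
        rw [hB]
        have := ih (s + 1) (accB ++ [[cur.1, cur.2]]) (s, s) true
          (fun _ => by constructor <;> omega) (by simp)
        simpa using this
      · have hA : stepA gsz (false, accB ++ [[cur.1, cur.2]], [cur.1, cur.2]) (s, x) =
            (false, accB ++ [[cur.1, cur.2]], [cur.1, cur.2]) := by
          simp [stepA, hx]
        have ho : onesFn (s, x) = none := by simp [onesFn, hx]
        rw [hA, ho]
        have := ih (s + 1) accB cur false (by simp) (fun _ => by omega)
        simpa using this

-- initial phase: before the first anomaly both sides keep producing nothing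
lemma init_phase (gsz : Int) (hg : 1 ≤ gsz) : ∀ (xs : List Int) (s : Int),
    outA ((PySem.List.enumerate xs s).foldl (stepA gsz) (false, [], []))
    = (match (PySem.List.enumerate xs s).filterMap onesFn with
       | [] => ([] : List (List Int))
       | o0 :: rest => outB gsz [] (o0, o0) rest) := by
  intro xs
  induction xs with
  | nil => intro s; simp [PySem.List.enumerate, outA]
  | cons x xs ih =>
    intro s
    rw [PySem.List.enumerate_cons, List.foldl_cons, List.filterMap_cons]
    by_cases hx : x = 1
    · have hA : stepA gsz (false, [], []) (s, x) = (true, [], [s, s]) := by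
        simp [stepA, hx]
      have ho : onesFn (s, x) = some s := by simp [onesFn, hx]
      rw [hA, ho]
      have := main_inv gsz hg xs (s + 1) [] (s, s) true (fun _ => by constructor <;> omega) (by simp)
      simpa using this
    · have hA : stepA gsz (false, [], []) (s, x) = (false, [], []) := by
        simp [stepA, hx]
      have ho : onesFn (s, x) = none := by simp [onesFn, hx]
      rw [hA, ho]
      exact ih (s + 1)

-- ===== VERDICT (by name: the statement is the Claim_ definition above) =====
theorem group_pred_spec : Claim_equal_group_pred := by
  intro pred gsz _ hg
  unfold Spec_group_pred group_pred group_pred_alt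
  have hbridge : (PySem.List.pyRange 0 (pred.length : Int) 1).foldl
        (fun st i => stepA gsz st (i, PySem.List.pyGetD pred i 0)) (false, [], [])
      = (PySem.List.enumerate pred 0).foldl (stepA gsz) (false, [], []) := by
    rw [PySem.List.enumerate_eq_map_pyRange (d := 0), List.foldl_map]
    simp [pysem]
  rw [hbridge]
  have := init_phase gsz hg pred 0
  simp only [outA, onesFn, outB] at this
  simpa using this
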